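-- pv_equiv track=rewrite | github.com/yang-su2000/CP-Practice | archived/2022-10/826b.py | foo
-- ===== SOURCE A (Python) =====
-- def foo(n):
--     if n == 1 or n == 3:
--         return [-1]
--     ans = [i for i in range(1, n + 1)]
--     ans.reverse()
--     if n % 2 == 0:
--         return ans
--     ans[n // 2:] = ans[n // 2:][::-1]
--     return ans
-- ===== SOURCE B (Python) =====
-- def foo(n):
--     if n == 1 or n == 3:
--         return [-1]
--     k = n // 2
--     return [n - i if n % 2 == 0 or i < k else i - k + 1 for i in range(n)]
-- ===== Notes on version B (the rewrite author's own statement) =====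
-- stated objective: alternative
-- what changed: B computes each entry directly from its index with one arithmetic formula in a single comprehension (n-i on the even branch/head, i-k+1 on the odd tail), instead of building 1..n, reversing the whole list, and reversing the tail slice in place.
import Mathlib
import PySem

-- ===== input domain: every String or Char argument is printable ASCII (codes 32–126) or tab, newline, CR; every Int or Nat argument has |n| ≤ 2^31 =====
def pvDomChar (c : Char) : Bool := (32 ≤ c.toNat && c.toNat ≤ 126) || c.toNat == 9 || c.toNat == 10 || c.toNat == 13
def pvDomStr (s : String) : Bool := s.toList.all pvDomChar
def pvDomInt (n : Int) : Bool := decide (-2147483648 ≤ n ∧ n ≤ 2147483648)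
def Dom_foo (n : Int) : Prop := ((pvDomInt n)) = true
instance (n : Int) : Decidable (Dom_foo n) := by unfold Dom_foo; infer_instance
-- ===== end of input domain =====

-- B computes each entry directly from its index in one comprehension instead of reverse-then-slice-flip; objective: alternative.


-- ===== PORT A =====
def foo (n : Int) : List Int :=
  if n == 1 || n == 3 then [-1]
  else
    let ans := PySem.List.pyRange 1 (n + 1) 1      -- [i for i in range(1, n+1)]
    let ans := ans.reverse                          -- ans.reverse()
    if PySem.Int.mod n 2 == 0 then ans
    else
      let k := PySem.Int.floordiv n 2
      -- ans[n//2:] = ans[n//2:][::-1]  (the [::-1] is exact by PySem.List.slice semantics)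
      PySem.List.slice ans none (some k) ++ (PySem.List.slice ans (some k) none).reverse

-- ===== PORT B =====
def foo_alt (n : Int) : List Int :=
  if n == 1 || n == 3 then [-1]
  else
    let k := PySem.Int.floordiv n 2
    (PySem.List.pyRange 0 n 1).map (fun i =>
      if PySem.Int.mod n 2 == 0 || i < k then n - i else i - k + 1)

-- ===== PRECONDITION & SPEC =====
def Spec_foo (n : Int) (out : List Int) : Prop := out = foo_alt n
instance (n : Int) (out : List Int) : Decidable (Spec_foo n out) := by unfold Spec_foo; infer_instance

-- ===== CLAIM (what is proved, stated in full; the proofs are below) =====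
def Claim_equal_foo : Prop := ∀ (n : Int), Dom_foo n → Spec_foo n (foo n)

-- ===== LEMMAS AND PROOFS =====

-- mapping i ↦ n - i over an ascending range gives the countdown range
theorem map_sub_range (n a b : Int) :
    (PySem.List.pyRange a b 1).map (fun i => n - i) = PySem.List.pyRange (n - a) (n - b) (-1) := by
  rw [PySem.List.pyRange_one, PySem.List.pyRange_neg_one, List.map_map]
  have : (n - a - (n - b)).toNat = (b - a).toNat := by omega
  rw [this]
  apply List.map_congr_left
  intro k _
  simp; omega

-- mapping i ↦ i - k + 1 over an ascending range shifts it
theorem map_shift_range (k a b : Int) :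
    (PySem.List.pyRange a b 1).map (fun i => i - k + 1) =
    PySem.List.pyRange (a - k + 1) (b - k + 1) 1 := by
  rw [PySem.List.pyRange_one, PySem.List.pyRange_one, List.map_map]
  have : (b - k + 1 - (a - k + 1)).toNat = (b - a).toNat := by omega
  rw [this]
  apply List.map_congr_left
  intro j _
  simp; omega

-- the reversed ascending range [n, …, 1] is the countdown range
theorem rev_range_eq (n : Int) :
    (PySem.List.pyRange 1 (n + 1) 1).reverse = PySem.List.pyRange n 0 (-1) := by
  rw [PySem.List.pyRange_neg_one_eq_reverse]; norm_num

-- ===== VERDICT (by name: the statement is the Claim_ definition above) =====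
theorem foo_spec : Claim_equal_foo := by
  intro n _
  unfold Spec_foo foo foo_alt
  by_cases h13 : n == 1 || n == 3
  · simp [h13]
  · simp only [h13, Bool.false_eq_true, if_false]
    by_cases hev : PySem.Int.mod n 2 == 0
    · -- even branch: list is [n, n-1, …, 1] on both sides
      simp only [hev, if_true, Bool.true_or]
      rw [rev_range_eq, map_sub_range]
      norm_num
    · simp only [hev, Bool.false_eq_true, if_false, Bool.false_or]
      have hm : PySem.Int.mod n 2 = n % 2 := PySem.Int.mod_eq_emod_of_pos (by norm_num)
      rw [hm] at hev
      have hne : n % 2 ≠ 0 := by simpa using hev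
      have hodd : n % 2 = 1 := by omega
      have hd : PySem.Int.floordiv n 2 = n / 2 := PySem.Int.floordiv_eq_ediv_of_pos (by norm_num)
      set k := PySem.Int.floordiv n 2 with hkdef
      have hn : n = 2 * k + 1 := by omega
      by_cases hkpos : 0 ≤ k
      · -- n odd, n ≥ 5 (or n = 1,3 excluded earlier leaves n ≥ 0 odd with k ≥ 0)
        -- split B's index range at k and use the two map lemmas
        have hsplit : PySem.List.pyRange 0 n 1 =
            PySem.List.pyRange 0 k 1 ++ PySem.List.pyRange k n 1 :=
          PySem.List.pyRange_one_append 0 k n (by omega) (by omega)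
        rw [hsplit, List.map_append]
        have hB1 : (PySem.List.pyRange 0 k 1).map
              (fun i => if decide (i < k) = true then n - i else i - k + 1) =
            PySem.List.pyRange n (n - k) (-1) := by
          have h0 : PySem.List.pyRange n (n - k) (-1) =
              (PySem.List.pyRange 0 k 1).map (fun i => n - i) := by
            rw [map_sub_range]; norm_num
          rw [h0]
          apply List.map_congr_left
          intro i hi
          rw [PySem.List.mem_pyRange_one] at hi
          simp [hi.2]
        have hB2 : (PySem.List.pyRange k n 1).map
              (fun i => if decide (i < k) = true then n - i else i - k + 1) =
            PySem.List.pyRange 1 (n - k + 1) 1 := by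
          have h1 : k - k + 1 = (1 : Int) := by ring
          have h0 : PySem.List.pyRange 1 (n - k + 1) 1 =
              (PySem.List.pyRange k n 1).map (fun i => i - k + 1) := by
            rw [map_shift_range, h1]
          rw [h0]
          apply List.map_congr_left
          intro i hi
          rw [PySem.List.mem_pyRange_one] at hi
          have hnot : ¬ i < k := by omega
          simp [hnot]
        rw [hB1, hB2]
        -- now A's side: take/drops of the countdown range
        have hrsplit : PySem.List.pyRange 1 (n + 1) 1 =
            PySem.List.pyRange 1 (n - k + 1) 1 ++ PySem.List.pyRange (n - k + 1) (n + 1) 1 :=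
          PySem.List.pyRange_one_append 1 (n - k + 1) (n + 1) (by omega) (by omega)
        have h1 : PySem.List.pyRange n (n - k) (-1) =
            (PySem.List.pyRange (n - k + 1) (n + 1) 1).reverse := by
          rw [PySem.List.pyRange_neg_one_eq_reverse]
        have hall : (PySem.List.pyRange 1 (n + 1) 1).reverse =
            PySem.List.pyRange n (n - k) (-1) ++ (PySem.List.pyRange 1 (n - k + 1) 1).reverse := by
          rw [hrsplit, List.reverse_append, h1]
        have hlen : (PySem.List.pyRange n (n - k) (-1)).length = k.toNat := by
          rw [PySem.List.length_pyRange_neg_one]; omega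
        rw [hall, PySem.List.slice_to _ hkpos, PySem.List.slice_from _ hkpos]
        rw [List.take_append_of_le_length (by omega), List.take_of_length_le (by omega)]
        rw [List.drop_append_of_le_length (by omega), List.drop_of_length_le (by omega),
            List.nil_append, List.reverse_reverse]
      · -- k < 0: n negative odd, everything is empty
        rw [PySem.List.pyRange_one_eq_nil (a := 1) (b := n + 1) (by omega),
            PySem.List.pyRange_one_eq_nil (a := 0) (b := n) (by omega)]
        simp [PySem.List.slice]
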